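-- pv_equiv track=rewrite | github.com/coinpit/cpmmbot.py | pymmbot/mmbot.py | get_price_for
-- ===== SOURCE A (Python) =====
-- def get_price_for(quantity, tuples):
--     total = 0
--     price = None
--     for tuple in tuples:
--         total += tuple[1]
--         price = tuple[0]
--         if total >= quantity:
--             return tuple[0]
--     return price
-- ===== SOURCE B (Python) =====
-- def get_price_for(quantity, tuples):
--     if not tuples:
--         return None
--     cum = []
--     s = 0
--     for _, q in tuples:
--         s += q
--         cum.append(s)
--     idx = next((i for i, c in enumerate(cum) if c >= quantity), None)
--     return tuples[idx][0] if idx is not None else tuples[-1][0]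
-- ===== Notes on version B (the rewrite author's own statement) =====
-- stated objective: alternative
-- what changed: Replaced the fused accumulate-and-test early-exit loop by a precomputed prefix-sum list followed by a separate first-index search, with explicit empty-input and last-price fallbacks.
import Mathlib
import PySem

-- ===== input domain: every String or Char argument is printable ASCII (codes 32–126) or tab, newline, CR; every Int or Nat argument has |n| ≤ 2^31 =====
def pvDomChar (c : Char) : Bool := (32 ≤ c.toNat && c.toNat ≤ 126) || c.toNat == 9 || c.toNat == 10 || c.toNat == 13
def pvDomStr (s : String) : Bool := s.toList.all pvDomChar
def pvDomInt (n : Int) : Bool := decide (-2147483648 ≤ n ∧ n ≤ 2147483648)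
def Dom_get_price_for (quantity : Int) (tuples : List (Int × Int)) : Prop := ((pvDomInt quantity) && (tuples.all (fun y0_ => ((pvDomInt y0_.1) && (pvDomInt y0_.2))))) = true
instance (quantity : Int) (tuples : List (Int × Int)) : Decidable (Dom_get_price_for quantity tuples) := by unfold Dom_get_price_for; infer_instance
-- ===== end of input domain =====

-- B replaces A's fused accumulate-and-test early-exit loop by a precomputed
-- prefix-sum list followed by a separate first-index search (alternative decomposition, same O(n) cost).

-- ===== PORT A =====
-- the for-loop of A, carrying (total, price) as it runs
def get_price_for_loop (quantity : Int) (total : Int) (price : Option Int) : List (Int × Int) → Option Int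
  | [] => price
  | t :: rest =>
      if total + t.2 ≥ quantity then some t.1
      else get_price_for_loop quantity (total + t.2) (some t.1) rest

def get_price_for (quantity : Int) (tuples : List (Int × Int)) : Option Int :=
  get_price_for_loop quantity 0 none tuples

-- ===== PORT B =====
-- the loop of B building cum: running sum s, emitting each prefix sum
def cumList (s : Int) : List (Int × Int) → List Int
  | [] => []
  | t :: rest => (s + t.2) :: cumList (s + t.2) rest

def get_price_for_alt (quantity : Int) (tuples : List (Int × Int)) : Option Int :=
  if tuples = [] then none
  else
    let cum := cumList 0 tuples
    -- next((i for i, c in enumerate(cum) if c >= quantity), None)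
    match cum.findIdx? (fun c => quantity ≤ c) with
    | some i => (tuples[i]?).map (·.1)   -- tuples[idx][0]; idx always in range
    | none => (tuples.getLast?).map (·.1) -- tuples[-1][0]

-- ===== PRECONDITION & SPEC =====
def Spec_get_price_for (quantity : Int) (tuples : List (Int × Int)) (out : Option Int) : Prop := out = get_price_for_alt quantity tuples
instance (quantity : Int) (tuples : List (Int × Int)) (out : Option Int) : Decidable (Spec_get_price_for quantity tuples out) := by unfold Spec_get_price_for; infer_instance

-- ===== CLAIM (what is proved, stated in full; the proofs are below) =====
def Claim_equal_get_price_for : Prop := ∀ (quantity : Int) (tuples : List (Int × Int)), Dom_get_price_for quantity tuples → Spec_get_price_for quantity tuples (get_price_for quantity tuples)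

-- ===== LEMMAS AND PROOFS =====
theorem loop_eq_alt (quantity : Int) (tuples : List (Int × Int)) :
    ∀ (s : Int) (price : Option Int),
    get_price_for_loop quantity s price tuples =
      match (cumList s tuples).findIdx? (fun c => quantity ≤ c) with
      | some i => (tuples[i]?).map (·.1)
      | none =>
          match tuples with
          | [] => price
          | _ :: _ => (tuples.getLast?).map (·.1) := by
  induction tuples with
  | nil => intro s price; simp [get_price_for_loop, cumList]
  | cons t rest ih =>
    intro s price
    simp only [get_price_for_loop, cumList, List.findIdx?_cons]
    by_cases h : quantity ≤ s + t.2
    · simp [h, ge_iff_le]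
    · simp only [decide_eq_true_eq, if_neg h]
      rw [ih (s + t.2) (some t.1)]
      cases hfi : (cumList (s + t.2) rest).findIdx? (fun c => quantity ≤ c) with
      | some i => simp
      | none =>
        cases rest with
        | nil => simp [List.getLast?]
        | cons u us => simp [List.getLast?_cons_cons]

-- ===== VERDICT (by name: the statement is the Claim_ definition above) =====
theorem get_price_for_spec : Claim_equal_get_price_for := by
  intro quantity tuples _
  unfold Spec_get_price_for get_price_for get_price_for_alt
  rw [loop_eq_alt]
  cases tuples with
  | nil => rfl
  | cons t rest => rfl
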